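-- pv_equiv track=rewrite | github.com/mjcross/AdventOfCode | 2022/day19/main.py | remove_inferior
-- ===== SOURCE A (Python) =====
-- def remove_inferior(scenarios):
--     cleaned = {}
--     while scenarios:
--         this_state, this_path = scenarios.popitem()
--         for other_state in scenarios.keys():
--             if this_state < other_state:
--                 break
--         else:
--             cleaned[this_state] = this_path
--     return cleaned
-- ===== SOURCE B (Python) =====
-- def remove_inferior(scenarios):
--     # One forward pass with a running lexicographic-maximum key: a state is dominated
--     # by some later-popped state iff it is < the running max of those states
--     # (tuple '<' is a total order, so 'less than some' = 'less than the max').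
--     items = list(scenarios.items())
--     scenarios.clear()
--     kept = []
--     best = None
--     for state, path in items:
--         if best is None or not state < best:
--             kept.append((state, path))
--         if best is None or best < state:
--             best = state
--     return dict(reversed(kept))
-- ===== Notes on version B (the rewrite author's own statement) =====
-- stated objective: alternative
-- what changed: A pops each state and scans all the remaining states for a dominator; B does one forward pass keeping a running lexicographic-maximum key ('<' on int tuples is a total order, so 'dominated by some remaining state' = 'less than the running max') and builds the result dict from the kept items reversed; both empty the input dict in place.
import Mathlib
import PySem

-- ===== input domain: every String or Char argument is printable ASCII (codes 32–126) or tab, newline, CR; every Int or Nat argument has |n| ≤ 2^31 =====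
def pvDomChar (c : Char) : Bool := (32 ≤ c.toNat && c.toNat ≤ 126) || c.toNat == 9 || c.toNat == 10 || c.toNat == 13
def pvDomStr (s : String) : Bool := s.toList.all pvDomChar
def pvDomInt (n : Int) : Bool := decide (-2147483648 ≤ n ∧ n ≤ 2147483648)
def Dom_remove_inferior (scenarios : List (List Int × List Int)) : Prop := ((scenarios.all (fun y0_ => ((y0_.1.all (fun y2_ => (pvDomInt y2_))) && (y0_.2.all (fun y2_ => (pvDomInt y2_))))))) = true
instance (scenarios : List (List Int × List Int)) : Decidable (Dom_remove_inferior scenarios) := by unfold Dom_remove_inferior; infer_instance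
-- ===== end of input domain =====

-- B replaces A's popitem/scan-the-remaining loop by a single forward pass keeping a running
-- lexicographic-maximum key ('<' on int tuples is a total order, so 'less than some earlier key' =
-- 'less than the max of the earlier keys'); both empty the input dict in place (side effect not
-- modelled here: the claim is about the RETURN value only).

-- ===== PORT A =====
-- while scenarios: popitem pops the LAST item, so the loop walks the reversed item list,
-- the not-yet-popped remainder being the tail of the reversed list.
def riLoopA : List (List Int × List Int) → PySem.Dict (List Int) (List Int) → PySem.Dict (List Int) (List Int)
  | [], cleaned => cleaned
  | (this_state, this_path) :: rest, cleaned =>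
      -- for other_state in scenarios.keys(): if this_state < other_state: break / else: insert
      if rest.any (fun kv => decide (this_state < kv.1)) then
        riLoopA rest cleaned
      else
        riLoopA rest (cleaned.insert this_state this_path)

def remove_inferior (scenarios : List (List Int × List Int)) : List (List Int × List Int) :=
  (riLoopA scenarios.reverse PySem.Dict.empty).items

-- ===== PORT B =====
-- one loop iteration of Source B: append to kept if not below the running max, then update the max
def riStep (acc : List (List Int × List Int) × Option (List Int)) (item : List Int × List Int) :
    List (List Int × List Int) × Option (List Int) :=
  let kept := match acc.2 with
    | none => acc.1 ++ [item]
    | some best => if ¬ item.1 < best then acc.1 ++ [item] else acc.1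
  let best := match acc.2 with
    | none => some item.1
    | some best => if best < item.1 then some item.1 else some best
  (kept, best)

def remove_inferior_alt (scenarios : List (List Int × List Int)) : List (List Int × List Int) :=
  let r := scenarios.foldl riStep ([], none)
  (PySem.Dict.ofList r.1.reverse).items    -- dict(reversed(kept))

-- ===== PRECONDITION & SPEC =====
-- Pre_ excludes association lists with duplicate keys: they do not represent any Python dict
-- (dict construction collapses duplicates), so no actual call of A receives them.
def Pre_remove_inferior (scenarios : List (List Int × List Int)) : Prop :=
  (scenarios.map Prod.fst).Nodup
instance (scenarios : List (List Int × List Int)) : Decidable (Pre_remove_inferior scenarios) := by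
  unfold Pre_remove_inferior; infer_instance
def pvWitness_remove_inferior : (List (List Int × List Int)) :=
  [([1, 2], [0]), ([1, 3], [1]), ([0], [2])]
def Spec_remove_inferior (scenarios : List (List Int × List Int)) (out : List (List Int × List Int)) : Prop := out = remove_inferior_alt scenarios
instance (scenarios : List (List Int × List Int)) (out : List (List Int × List Int)) : Decidable (Spec_remove_inferior scenarios out) := by unfold Spec_remove_inferior; infer_instance

-- ===== CLAIM (what is proved, stated in full; the proofs are below) =====
def Claim_equal_remove_inferior : Prop := ∀ (scenarios : List (List Int × List Int)), Dom_remove_inferior scenarios → Pre_remove_inferior scenarios → Spec_remove_inferior scenarios (remove_inferior scenarios)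

-- ===== LEMMAS AND PROOFS =====

-- 'x is below the running max b' (b = none: no earlier key yet)
def riDominated (b : Option (List Int)) (x : List Int) : Bool :=
  match b with
  | none => false
  | some m => decide (x < m)

-- running-max update
def riUpd (b : Option (List Int)) (k : List Int) : Option (List Int) :=
  match b with
  | none => some k
  | some m => if m < k then some k else some m

-- what A's loop keeps, with a phantom earlier-side max b (b dominates from beyond the list)
def keepA' (b : Option (List Int)) : List (List Int × List Int) → List (List Int × List Int)
  | [] => []
  | x :: rest =>
      if rest.any (fun kv => decide (x.1 < kv.1)) || riDominated b x.1 then keepA' b rest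
      else x :: keepA' b rest

-- what B's pass keeps, forward order, starting from running max b
def gKeep (b : Option (List Int)) : List (List Int × List Int) → List (List Int × List Int)
  | [] => []
  | x :: rest =>
      if riDominated b x.1 then gKeep (riUpd b x.1) rest
      else x :: gKeep (riUpd b x.1) rest

theorem riDominated_upd (b : Option (List Int)) (k x : List Int) :
    riDominated (riUpd b k) x = (decide (x < k) || riDominated b x) := by
  cases b with
  | none => simp [riDominated, riUpd]
  | some m =>
      simp only [riDominated, riUpd]
      rcases lt_or_ge m k with h | h
      · rw [if_pos h]
        have ht : x < m → x < k := fun hx => hx.trans h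
        by_cases h2 : x < k
        · simp [h2]
        · have hm : ¬ x < m := fun hx => h2 (ht hx)
          simp [h2, hm]
      · rw [if_neg (not_lt.2 h)]
        have ht : x < k → x < m := fun hx => hx.trans_le h
        by_cases h1 : x < m
        · simp [h1]
        · have hk : ¬ x < k := fun hx => h1 (ht hx)
          simp [h1, hk]

theorem keepA'_append_singleton (b : Option (List Int)) (x : List Int × List Int)
    (ys : List (List Int × List Int)) :
    keepA' b (ys ++ [x]) =
      keepA' (riUpd b x.1) ys ++ (if riDominated b x.1 then [] else [x]) := by
  induction ys with
  | nil => simp [keepA']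
  | cons y t ih =>
      simp only [List.cons_append, keepA', List.any_append, List.any_cons, List.any_nil,
        Bool.or_false, riDominated_upd]
      by_cases h : (t.any (fun kv => decide (y.1 < kv.1)) || (decide (y.1 < x.1) || riDominated b y.1)) = true
      · rw [if_pos (by simpa [Bool.or_assoc, Bool.or_comm, Bool.or_left_comm] using h),
            if_pos (by simpa [Bool.or_assoc, Bool.or_comm, Bool.or_left_comm] using h), ih]
      · rw [if_neg (by simpa [Bool.or_assoc, Bool.or_comm, Bool.or_left_comm] using h),
            if_neg (by simpa [Bool.or_assoc, Bool.or_comm, Bool.or_left_comm] using h), ih]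
        simp

theorem gKeep_reverse (l : List (List Int × List Int)) (b : Option (List Int)) :
    (gKeep b l).reverse = keepA' b l.reverse := by
  induction l generalizing b with
  | nil => simp [gKeep, keepA']
  | cons x t ih =>
      simp only [gKeep, List.reverse_cons, keepA'_append_singleton]
      by_cases h : riDominated b x.1 = true
      · simp [h, ih]
      · simp [h, ih]

theorem foldl_riStep (l : List (List Int × List Int)) (kept0 : List (List Int × List Int))
    (b : Option (List Int)) :
    l.foldl riStep (kept0, b) = (kept0 ++ gKeep b l, l.foldl (fun b x => riUpd b x.1) b) := by
  induction l generalizing kept0 b with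
  | nil => simp [gKeep]
  | cons x t ih =>
      simp only [List.foldl_cons, ih]
      cases b with
      | none => simp [riStep, gKeep, riDominated, riUpd]
      | some m =>
          by_cases h : x.1 < m
          · simp [riStep, gKeep, riDominated, riUpd, h]
          · simp [riStep, gKeep, riDominated, riUpd, h]

theorem riLoopA_items (l : List (List Int × List Int)) (d : PySem.Dict (List Int) (List Int))
    (h1 : (l.map Prod.fst).Nodup) (h2 : ∀ a ∈ l, d.contains a.1 = false) :
    (riLoopA l d).items = d.items ++ keepA' none l := by
  induction l generalizing d with
  | nil => simp [riLoopA, keepA']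
  | cons x t ih =>
      obtain ⟨s, p⟩ := x
      simp only [List.map_cons, List.nodup_cons] at h1
      simp only [riLoopA, keepA', riDominated, Bool.or_false]
      by_cases h : (t.any (fun kv => decide (s < kv.1))) = true
      · rw [if_pos h, if_pos h, ih _ h1.2 (fun a ha => h2 a (List.mem_cons_of_mem _ ha))]
      · have hcont : ∀ a ∈ t, ((d.insert s p).contains a.1) = false := by
          intro a ha
          have hne : a.1 ≠ s := fun he => h1.1 (he ▸ List.mem_map_of_mem ha)
          simp [PySem.Dict.contains_insert, hne, h2 a (List.mem_cons_of_mem _ ha)]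
        rw [if_neg h, if_neg h, ih _ h1.2 hcont,
          PySem.Dict.items_insert_of_not_contains _ _ (h2 (s, p) (by simp))]
        simp

theorem gKeep_sublist (b : Option (List Int)) (l : List (List Int × List Int)) :
    (gKeep b l).Sublist l := by
  induction l generalizing b with
  | nil => simp [gKeep]
  | cons x t ih =>
      simp only [gKeep]
      by_cases h : riDominated b x.1 = true
      · simp only [if_pos h]; exact (ih _).cons x
      · simp only [if_neg h]; exact (ih _).cons₂ x

-- ===== VERDICT (by name: the statement is the Claim_ definition above) =====
theorem remove_inferior_spec : Claim_equal_remove_inferior := by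
  intro scenarios _ hpre
  unfold Pre_remove_inferior at hpre
  have hnd : ((gKeep none scenarios).reverse.map Prod.fst).Nodup := by
    simpa [List.map_reverse, List.nodup_reverse] using
      ((gKeep_sublist none scenarios).map Prod.fst).nodup hpre
  have hB : remove_inferior_alt scenarios = (gKeep none scenarios).reverse := by
    have hof : PySem.Dict.ofList (gKeep none scenarios).reverse =
        (gKeep none scenarios).reverse.foldl (fun d p => d.insert p.1 p.2) PySem.Dict.empty := by
      simp [PySem.Dict.ofList, PySem.Dict.update]
    simp only [remove_inferior_alt, foldl_riStep, List.nil_append]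
    rw [hof, PySem.Dict.items_foldl_insert_fresh _ _ _ _
      (fun a _ => PySem.Dict.contains_empty _) hnd]
    simp [PySem.Dict.empty]
  have hA : remove_inferior scenarios = (gKeep none scenarios).reverse := by
    unfold remove_inferior
    rw [riLoopA_items scenarios.reverse PySem.Dict.empty
        (by simpa [List.map_reverse, List.nodup_reverse] using hpre)
        (fun a _ => PySem.Dict.contains_empty _), gKeep_reverse]
    simp [PySem.Dict.empty]
  unfold Spec_remove_inferior
  rw [hA, hB]
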